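-- pv_equiv track=rewrite | github.com/byron-parser/byron | template_slr.py | pega_simbolos
-- ===== SOURCE A (Python) =====
-- def pega_simbolos(est):
--     simbolos = []
--     for e in est:
--         esq, prod, pos = e
--         if pos < len(prod):
--             if prod[pos] not in simbolos:
--                 simbolos.append(prod[pos])
--     return simbolos
-- ===== SOURCE B (Python) =====
-- def pega_simbolos(est):
--     candidatos = [prod[pos] for (esq, prod, pos) in est if pos < len(prod)]
--
--     def sieve(xs):
--         # keep the head, then recursively dedup the tail with every copy of the head removed
--         if not xs:
--             return []
--         h = xs[0]
--         return [h] + sieve([x for x in xs[1:] if x != h])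
--
--     return sieve(candidatos)
-- ===== Notes on version B (the rewrite author's own statement) =====
-- stated objective: alternative
-- what changed: B first projects the next-symbol candidates with a comprehension, then deduplicates by a recursive sieve (keep the head, filter all its later copies out of the remainder and recurse), instead of A's single loop that tests membership in the growing output list.
import Mathlib
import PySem

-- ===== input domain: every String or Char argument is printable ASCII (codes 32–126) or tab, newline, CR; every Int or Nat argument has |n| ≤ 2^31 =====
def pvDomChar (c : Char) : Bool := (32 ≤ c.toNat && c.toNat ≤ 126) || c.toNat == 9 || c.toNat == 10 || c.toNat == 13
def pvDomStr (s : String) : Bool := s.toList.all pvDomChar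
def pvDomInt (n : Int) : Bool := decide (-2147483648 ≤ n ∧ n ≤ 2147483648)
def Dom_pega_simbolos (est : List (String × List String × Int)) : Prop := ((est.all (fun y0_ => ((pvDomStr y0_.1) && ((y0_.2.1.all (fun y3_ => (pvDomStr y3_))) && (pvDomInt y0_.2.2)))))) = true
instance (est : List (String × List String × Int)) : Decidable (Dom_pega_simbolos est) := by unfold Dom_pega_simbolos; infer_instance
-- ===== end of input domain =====

-- B projects the next-symbol candidates, then deduplicates by a recursive sieve
-- (keep the head, filter its later copies out, recurse) instead of A's inline
-- membership test against the growing output; equivalence proved on inputs where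
-- A does not raise IndexError.

-- ===== PORT A =====
def pega_simbolos (est : List (String × List String × Int)) : List String :=
  est.foldl (fun simbolos e =>
    let prod := e.2.1
    let pos := e.2.2
    if pos < (prod.length : Int) then
      match PySem.List.pyGet? prod pos with
      | some v => if v ∈ simbolos then simbolos else simbolos ++ [v]
      | none => simbolos          -- IndexError: excluded by Pre_pega_simbolos
    else simbolos) []

-- ===== PORT B =====
-- the sieve in Source B: keep the head, remove its copies from the tail, recurse
def pvSieve : List String → List String
  | [] => []
  | h :: t => h :: pvSieve (t.filter (fun x => x ≠ h))
termination_by xs => xs.length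
decreasing_by
  simp only [List.length_cons, List.length_unattach]
  exact Nat.lt_succ_of_le (le_trans (List.length_filter_le _ _) (by simp))

def pega_simbolos_alt (est : List (String × List String × Int)) : List String :=
  let candidatos := est.foldl (fun acc e =>
    let prod := e.2.1
    let pos := e.2.2
    if pos < (prod.length : Int) then
      acc ++ [(PySem.List.pyGet? prod pos).getD ""]   -- IndexError: excluded by Pre_pega_simbolos
    else acc) []
  pvSieve candidatos

-- ===== PRECONDITION & SPEC =====
-- Pre_ excludes exactly the inputs on which A (and B) raise IndexError: an item whose
-- position is below -len(prod) while still < len(prod).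
def Pre_pega_simbolos (est : List (String × List String × Int)) : Prop :=
  ∀ e ∈ est, e.2.2 < (e.2.1.length : Int) → PySem.Raise.InRange e.2.1.length e.2.2
instance (est : List (String × List String × Int)) : Decidable (Pre_pega_simbolos est) := by unfold Pre_pega_simbolos; infer_instance

def pvWitness_pega_simbolos : (List (String × List String × Int)) :=
  [("S", ["a", "b"], 0), ("S", ["a"], 1), ("T", ["b"], -1)]

def Spec_pega_simbolos (est : List (String × List String × Int)) (out : List String) : Prop := out = pega_simbolos_alt est
instance (est : List (String × List String × Int)) (out : List String) : Decidable (Spec_pega_simbolos est out) := by unfold Spec_pega_simbolos; infer_instance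

-- ===== CLAIM (what is proved, stated in full; the proofs are below) =====
def Claim_equal_pega_simbolos : Prop := ∀ (est : List (String × List String × Int)), Dom_pega_simbolos est → Pre_pega_simbolos est → Spec_pega_simbolos est (pega_simbolos est)

-- ===== LEMMAS AND PROOFS =====

-- the projection of one item: its next symbol if the dot is before the end, else nothing
def pvProj (e : String × List String × Int) : List String :=
  if e.2.2 < (e.2.1.length : Int) then [(PySem.List.pyGet? e.2.1 e.2.2).getD ""] else []

theorem pvStepB_eq :
    (fun (acc : List String) (e : String × List String × Int) =>
      let prod := e.2.1
      let pos := e.2.2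
      if pos < (prod.length : Int) then
        acc ++ [(PySem.List.pyGet? prod pos).getD ""]
      else acc)
    = fun acc e => acc ++ pvProj e := by
  funext acc e
  dsimp only [pvProj]
  split <;> simp

-- A's loop, from any accumulator, is Set.add folded over the projected symbols.
theorem pega_simbolos_fold_eq (est : List (String × List String × Int))
    (h : Pre_pega_simbolos est) (s : List String) :
    est.foldl (fun simbolos e =>
      let prod := e.2.1
      let pos := e.2.2
      if pos < (prod.length : Int) then
        match PySem.List.pyGet? prod pos with
        | some v => if v ∈ simbolos then simbolos else simbolos ++ [v]
        | none => simbolos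
      else simbolos) s
    = (est.flatMap pvProj).foldl PySem.Set.add s := by
  induction est generalizing s with
  | nil => rfl
  | cons e tl ih =>
    have hpre : Pre_pega_simbolos tl := fun x hx => h x (List.mem_cons_of_mem _ hx)
    rw [List.foldl_cons, List.flatMap_cons, List.foldl_append, ih hpre]
    congr 1
    by_cases hc : e.2.2 < (e.2.1.length : Int)
    · have hin : PySem.Raise.InRange e.2.1.length e.2.2 := h e (List.mem_cons_self) hc
      obtain ⟨v, hv⟩ : ∃ v, PySem.List.pyGet? e.2.1 e.2.2 = some v := by
        rcases hopt : PySem.List.pyGet? e.2.1 e.2.2 with _ | v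
        · rw [PySem.List.pyGet?_eq_none_iff] at hopt
          exact absurd hin hopt
        · exact ⟨v, rfl⟩
      dsimp only [pvProj]
      rw [if_pos hc, if_pos hc, hv]
      simp [PySem.Set.add_eq_ite]
    · dsimp only [pvProj]
      rw [if_neg hc, if_neg hc]
      rfl

-- folding Set.add over xs starting from s = s followed by the sieve of the fresh elements
theorem foldl_add_eq_sieve (xs : List String) (s : List String) :
    xs.foldl PySem.Set.add s = s ++ pvSieve (xs.filter (fun x => decide (x ∉ s))) := by
  induction xs generalizing s with
  | nil => simp [pvSieve]
  | cons h t ih =>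
    rw [List.foldl_cons, List.filter_cons]
    by_cases hm : h ∈ s
    · have hadd : PySem.Set.add s h = s := by
        simp [PySem.Set.add_eq_ite, hm]
      rw [hadd, ih s]
      simp [hm]
    · have hadd : PySem.Set.add s h = s ++ [h] := by
        simp [PySem.Set.add_eq_ite, hm]
      rw [hadd, ih (s ++ [h])]
      have hf : t.filter (fun x => decide (x ∉ s ++ [h]))
          = (t.filter (fun x => decide (x ∉ s))).filter (fun x => decide (x ≠ h)) := by
        rw [List.filter_filter]
        apply List.filter_congr
        intro x _
        by_cases hxh : x = h <;> by_cases hxs : x ∈ s <;> simp [hxh, hxs]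
      simp only [decide_not] at hf ⊢
      simp only [hm, decide_false, Bool.not_false, if_pos]
      rw [hf, pvSieve]
      simp [decide_not]

-- ===== VERDICT (by name: the statement is the Claim_ definition above) =====
theorem pega_simbolos_spec : Claim_equal_pega_simbolos := by
  intro est _ hpre
  unfold Spec_pega_simbolos pega_simbolos pega_simbolos_alt
  rw [pega_simbolos_fold_eq est hpre [], pvStepB_eq,
      PySem.List.foldl_append_eq_flatMap, List.nil_append,
      foldl_add_eq_sieve, List.nil_append]
  congr 1
  simp
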